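-- pv_equiv track=rewrite | github.com/geekhub-python/if-else-conditions-lists-vborshchov | task4.py | pair_counter
-- ===== SOURCE A (Python) =====
-- import math
--
-- def pair_counter(number_list):
--   result = []
--   unique = set(number_list)
--   for number in unique:
--     result.append(number_list.count(number))
--
--   pairs_number = 0
--   for x in result:
--     if x >= 2:
--       pairs_number += math.factorial(x) // (math.factorial(x-2) * 2)
--
--   return pairs_number
-- ===== SOURCE B (Python) =====
-- def pair_counter(number_list):
--   seen = {}
--   pairs = 0
--   for x in number_list:
--     pairs += seen.get(x, 0)
--     seen[x] = seen.get(x, 0) + 1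
--   return pairs
-- ===== Notes on version B (the rewrite author's own statement) =====
-- stated objective: faster
-- what changed: Replaces the group-by-unique-values pass with repeated list.count plus a factorial-based C(n,2) sum by a single fused pass that keeps a running count dict and adds, for each element, the number of its prior occurrences (each prior occurrence is one new pair).
import Mathlib
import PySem

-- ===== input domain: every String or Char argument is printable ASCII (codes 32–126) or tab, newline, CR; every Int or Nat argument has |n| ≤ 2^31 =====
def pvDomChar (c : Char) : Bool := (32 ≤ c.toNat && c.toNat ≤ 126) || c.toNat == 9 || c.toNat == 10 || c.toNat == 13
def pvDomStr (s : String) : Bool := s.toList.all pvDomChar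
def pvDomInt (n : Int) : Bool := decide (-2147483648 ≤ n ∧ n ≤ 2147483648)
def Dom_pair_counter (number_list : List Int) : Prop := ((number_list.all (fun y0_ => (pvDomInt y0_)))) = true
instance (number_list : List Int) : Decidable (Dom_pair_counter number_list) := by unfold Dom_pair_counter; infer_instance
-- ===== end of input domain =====

-- B replaces A's count-per-unique-value + factorial C(n,2) sum by one fused pass with a running-count dict (faster).

-- ===== PORT A =====
-- math.factorial; exact for the nonnegative arguments A feeds it (occurrence counts ≥ 2)
def pyFactorial (x : Int) : Int := (Nat.factorial x.toNat : Int)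

def pair_counter (number_list : List Int) : Int :=
  let unique := PySem.Set.ofList number_list
  let result := unique.foldl (fun r n => r ++ [((PySem.List.count number_list n : Nat) : Int)]) []
  let pairs_number := result.foldl
    (fun p x => if x ≥ 2 then p + PySem.Int.floordiv (pyFactorial x) (pyFactorial (x - 2) * 2) else p) 0
  pairs_number

-- ===== PORT B =====
def pair_counter_alt (number_list : List Int) : Int :=
  let st := number_list.foldl
    (fun (st : PySem.Dict Int Int × Int) x =>
      (st.1.insert x (st.1.getD x 0 + 1), st.2 + st.1.getD x 0))
    (PySem.Dict.empty, 0)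
  st.2

-- ===== PRECONDITION & SPEC =====
def Spec_pair_counter (number_list : List Int) (out : Int) : Prop := out = pair_counter_alt number_list
instance (number_list : List Int) (out : Int) : Decidable (Spec_pair_counter number_list out) := by unfold Spec_pair_counter; infer_instance

-- ===== CLAIM (what is proved, stated in full; the proofs are below) =====
def Claim_equal_pair_counter : Prop := ∀ (number_list : List Int), Dom_pair_counter number_list → Spec_pair_counter number_list (pair_counter number_list)

-- ===== LEMMAS AND PROOFS =====

-- number of unordered equal-value pairs, recursively: each head pairs with its occurrences in the tail
def pvPairs : List Int → Nat
  | [] => 0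
  | a :: t => t.count a + pvPairs t

-- C(c,2)
def pvC2 (c : Nat) : Nat := c * (c - 1) / 2

theorem pvC2_succ (c : Nat) : pvC2 (c + 1) = pvC2 c + c := by
  cases c with
  | zero => rfl
  | succ d =>
    show (d + 2) * (d + 1) / 2 = (d + 1) * d / 2 + (d + 1)
    have h : (d + 2) * (d + 1) = (d + 1) * d + (d + 1) * 2 := by ring
    rw [h, Nat.add_mul_div_right _ _ (by omega : 0 < 2)]

theorem pvSum_map_add (t : List Int) (f g : Int → Int) :
    (t.map (fun x => f x + g x)).sum = (t.map f).sum + (t.map g).sum := by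
  induction t with
  | nil => simp
  | cons b s ihs => simp only [List.map_cons, List.sum_cons, ihs]; ring

theorem pvSum_ite (t : List Int) (a : Int) :
    (t.map (fun x => if x = a then (1 : Int) else 0)).sum = (t.count a : Int) := by
  induction t with
  | nil => simp
  | cons b s ihs =>
    simp only [List.map_cons, List.sum_cons, ihs, List.count_cons]
    by_cases h : b = a
    · subst h; simp; omega
    · simp [h]

-- ---- B side: the fold computes pvPairs plus the dict's contribution ----
theorem pvB_fold (l : List Int) (d : PySem.Dict Int Int) (p : Int) :
    (l.foldl (fun (st : PySem.Dict Int Int × Int) x =>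
        (st.1.insert x (st.1.getD x 0 + 1), st.2 + st.1.getD x 0)) (d, p)).2
      = p + (pvPairs l : Nat) + (l.map (fun x => d.getD x 0)).sum := by
  induction l generalizing d p with
  | nil => simp [pvPairs]
  | cons a t ih =>
    simp only [List.foldl_cons, ih, pvPairs]
    simp only [List.map_cons, List.sum_cons]
    have hmap : (t.map (fun x => (d.insert a (d.getD a 0 + 1)).getD x 0))
        = t.map (fun x => d.getD x 0 + (if x = a then (1 : Int) else 0)) := by
      apply List.map_congr_left
      intro x hx
      rw [PySem.Dict.getD_insert]
      by_cases h : x = a <;> simp [h]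
    have hsum : (t.map (fun x => d.getD x 0 + (if x = a then (1 : Int) else 0))).sum
        = (t.map (fun x => d.getD x 0)).sum + (t.count a : Int) := by
      rw [pvSum_map_add]
      rw [pvSum_ite]
    rw [hmap, hsum]
    push_cast
    ring

theorem pvB_eq (l : List Int) : pair_counter_alt l = (pvPairs l : Int) := by
  show (l.foldl _ (PySem.Dict.empty, 0)).2 = _
  rw [pvB_fold]
  simp

-- ---- A side ----
theorem pvA_term (k : Nat) :
    PySem.Int.floordiv (pyFactorial ((k + 2 : Nat) : Int)) (pyFactorial (((k + 2 : Nat) : Int) - 2) * 2)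
      = (pvC2 (k + 2) : Int) := by
  have h1 : (((k + 2 : Nat) : Int)).toNat = k + 2 := by omega
  have h2 : (((k + 2 : Nat) : Int) - 2).toNat = k := by omega
  unfold pyFactorial
  rw [h1, h2]
  have hcast : ((Nat.factorial k : Int) * 2) = ((Nat.factorial k * 2 : Nat) : Int) := by push_cast; ring
  rw [hcast, PySem.Int.floordiv_natCast]
  congr 1
  have hfac : Nat.factorial (k + 2) = Nat.factorial k * ((k + 2) * (k + 1)) := by
    rw [Nat.factorial_succ, Nat.factorial_succ]; ring
  rw [hfac]
  rw [Nat.mul_div_mul_left _ _ (Nat.factorial_pos k)]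
  unfold pvC2
  congr 1

theorem pvA_g (l : List Int) (v : Int) (hv : v ∈ l) :
    (if ((l.count v : Nat) : Int) ≥ 2 then
        (0 : Int) + PySem.Int.floordiv (pyFactorial ((l.count v : Nat) : Int)) (pyFactorial (((l.count v : Nat) : Int) - 2) * 2)
      else 0)
      = (pvC2 (l.count v) : Int) := by
  have hpos : 0 < l.count v := List.count_pos_iff.mpr hv
  rcases Nat.lt_or_ge (l.count v) 2 with h | h
  · have h1 : l.count v = 1 := by omega
    rw [h1]
    norm_num [pvC2]
  · obtain ⟨k, hk⟩ : ∃ k, l.count v = k + 2 := ⟨l.count v - 2, by omega⟩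
    rw [hk]
    rw [if_pos (by push_cast; omega)]
    rw [zero_add, pvA_term]

-- sum of C(count,2) over the distinct values equals pvPairs
theorem pvFinset_sum (l : List Int) :
    (∑ v ∈ l.toFinset, pvC2 (l.count v)) = pvPairs l := by
  induction l with
  | nil => simp [pvPairs]
  | cons a t ih =>
    rw [List.toFinset_cons]
    by_cases ha : a ∈ t
    · have hins : insert a t.toFinset = t.toFinset := by
        simp [ha]
      rw [hins]
      have hsplit : (∑ v ∈ t.toFinset, pvC2 ((a :: t).count v))
          = ∑ v ∈ t.toFinset, (pvC2 (t.count v) + if v = a then t.count a else 0) := by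
        apply Finset.sum_congr rfl
        intro v _
        by_cases h : v = a
        · subst h; simp [pvC2_succ]
        · simp [h, Ne.symm h]
      rw [hsplit, Finset.sum_add_distrib, ih]
      rw [Finset.sum_ite_eq' t.toFinset a (fun _ => t.count a)]
      simp only [pvPairs, List.mem_toFinset.mpr ha, if_true]
      omega
    · have hmem : a ∉ t.toFinset := fun h => ha (List.mem_toFinset.mp h)
      rw [Finset.sum_insert hmem]
      have hcnt : (a :: t).count a = 1 := by
        simp [List.count_eq_zero_of_not_mem ha]
      have herase : (∑ v ∈ t.toFinset, pvC2 ((a :: t).count v))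
          = ∑ v ∈ t.toFinset, pvC2 (t.count v) := by
        apply Finset.sum_congr rfl
        intro v hvm
        have hne : v ≠ a := fun he => ha (he ▸ List.mem_toFinset.mp hvm)
        simp [Ne.symm hne]
      rw [hcnt, herase, ih]
      simp [pvPairs, pvC2, List.count_eq_zero_of_not_mem ha]

theorem pvA_eq (l : List Int) : pair_counter l = (pvPairs l : Int) := by
  show ((PySem.Set.ofList l).foldl (fun r n => r ++ [((PySem.List.count l n : Nat) : Int)]) []).foldl _ 0 = _
  rw [PySem.List.foldl_append_singleton_eq_map]
  have hstep : (fun (p x : Int) => if x ≥ 2 then p + PySem.Int.floordiv (pyFactorial x) (pyFactorial (x - 2) * 2) else p)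
      = fun p x => p + (if x ≥ 2 then (0:Int) + PySem.Int.floordiv (pyFactorial x) (pyFactorial (x - 2) * 2) else 0) := by
    funext p x
    split_ifs <;> ring
  rw [hstep, PySem.List.foldl_add]
  simp only [List.nil_append, List.map_map]
  have hmap : ((PySem.Set.ofList l).map ((fun x => if x ≥ 2 then (0:Int) + PySem.Int.floordiv (pyFactorial x) (pyFactorial (x - 2) * 2) else 0) ∘ fun n => ((PySem.List.count l n : Nat) : Int)))
      = (PySem.Set.ofList l).map (fun v => (pvC2 (l.count v) : Int)) := by
    apply List.map_congr_left
    intro v hv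
    have hvl : v ∈ l := (PySem.Set.mem_ofList _ _).mp hv
    simp only [Function.comp]
    rw [PySem.List.count_eq]
    exact pvA_g l v hvl
  rw [hmap]
  have hnd : (PySem.Set.ofList l).Nodup := PySem.Set.nodup_ofList l
  have htf : (PySem.Set.ofList l).toFinset = l.toFinset := by
    ext v; simp [List.mem_toFinset, PySem.Set.mem_ofList]
  rw [← List.sum_toFinset _ hnd, htf]
  rw [← Nat.cast_sum]
  rw [pvFinset_sum]
  simp

-- ===== VERDICT (by name: the statement is the Claim_ definition above) =====
theorem pair_counter_spec : Claim_equal_pair_counter := by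
  intro l _
  show pair_counter l = pair_counter_alt l
  rw [pvA_eq, pvB_eq]
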